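-- pv_equiv track=rewrite | github.com/pratik180791/coding-practice | Leetcode/medium/expedia.py | countOptions
-- ===== SOURCE A (Python) =====
-- def countOptions(people, groups):
--     # Write your code here
--
--     visited = [[0 for i in range(groups+1)] for _ in range(people+1)]
--     for i in range(0, people+1):
--         visited[i][1] = 1
--     visited[0][0] = 1
--     for i in range(1, people+1):
--         for j in range(2, groups+1):
--             if i>=j:
--                 visited[i][j]= visited[i-1][j-1] + visited[i][j-1]
--             else:
--                 visited[i][j] = visited[i-1][j-1]
--     return visited[people][groups]
-- ===== SOURCE B (Python) =====
-- def countOptions(people, groups):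
--     # closed form: the DP table's answer is 0 below the diagonal band,
--     # 1 on people == groups-1, and 2**(groups-1) once people >= groups
--     if people < groups - 1:
--         return 0
--     if people == groups - 1:
--         return 1
--     return 2 ** (groups - 1)
-- ===== Notes on version B (the rewrite author's own statement) =====
-- stated objective: faster
-- what changed: Replaces the O(people*groups) DP table with the closed form 0 / 1 / 2^(groups-1) chosen by comparing people with groups-1.
import Mathlib
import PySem

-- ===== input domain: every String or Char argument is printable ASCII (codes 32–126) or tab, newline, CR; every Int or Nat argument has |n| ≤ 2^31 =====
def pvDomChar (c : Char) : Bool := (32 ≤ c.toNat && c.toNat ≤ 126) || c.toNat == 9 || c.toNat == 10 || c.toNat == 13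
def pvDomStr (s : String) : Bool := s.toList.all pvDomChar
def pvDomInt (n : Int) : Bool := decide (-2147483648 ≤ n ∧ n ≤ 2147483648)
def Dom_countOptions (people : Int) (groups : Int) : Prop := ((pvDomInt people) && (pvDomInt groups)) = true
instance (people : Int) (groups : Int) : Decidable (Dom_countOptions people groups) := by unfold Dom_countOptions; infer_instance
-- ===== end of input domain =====

-- B replaces A's O(people*groups) DP table with a three-case closed form (faster).

-- ===== PORT A =====
-- A's 2-D list `visited`; write/read helpers for visited[i][j] (A's indices are
-- the loops' nonnegative ints; an out-of-range read/write raises in Python and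
-- lies outside Pre_, here set is a no-op and the read yields a default).
def pvSet2 (v : List (List Int)) (i j : Int) (x : Int) : List (List Int) :=
  v.set i.toNat ((v.getD i.toNat []).set j.toNat x)

def pvGet2 (v : List (List Int)) (i j : Int) : Int :=
  PySem.List.pyGetD (PySem.List.pyGetD v i []) j 0

def countOptions (people : Int) (groups : Int) : Int :=
  -- visited = [[0 for i in range(groups+1)] for _ in range(people+1)]
  let v0 : List (List Int) :=
    (PySem.List.pyRange 0 (people+1) 1).map
      (fun _ => (PySem.List.pyRange 0 (groups+1) 1).map (fun _ => (0:Int)))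
  -- for i in range(0, people+1): visited[i][1] = 1
  let v1 := (PySem.List.pyRange 0 (people+1) 1).foldl (fun v i => pvSet2 v i 1 1) v0
  -- visited[0][0] = 1
  let v2 := pvSet2 v1 0 0 1
  -- nested loops filling rows 1..people, columns 2..groups
  let v3 := (PySem.List.pyRange 1 (people+1) 1).foldl (fun v i =>
      (PySem.List.pyRange 2 (groups+1) 1).foldl (fun v j =>
        if i ≥ j then pvSet2 v i j (pvGet2 v (i-1) (j-1) + pvGet2 v i (j-1))
        else pvSet2 v i j (pvGet2 v (i-1) (j-1))) v) v2
  -- return visited[people][groups]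
  pvGet2 v3 people groups

-- ===== PORT B =====
def countOptions_alt (people : Int) (groups : Int) : Int :=
  if people < groups - 1 then 0
  else if people = groups - 1 then 1
  else 2 ^ (groups - 1).toNat

-- ===== PRECONDITION & SPEC =====
-- Pre_ excludes exactly the inputs on which A raises IndexError (people < 0 or groups < 1).
def Pre_countOptions (people : Int) (groups : Int) : Prop := 0 ≤ people ∧ 1 ≤ groups
instance (people : Int) (groups : Int) : Decidable (Pre_countOptions people groups) := by unfold Pre_countOptions; infer_instance
def pvWitness_countOptions : Int × Int := (4, 3)

def Spec_countOptions (people : Int) (groups : Int) (out : Int) : Prop := out = countOptions_alt people groups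
instance (people : Int) (groups : Int) (out : Int) : Decidable (Spec_countOptions people groups out) := by unfold Spec_countOptions; infer_instance

-- ===== CLAIM (what is proved, stated in full; the proofs are below) =====
def Claim_equal_countOptions : Prop := ∀ (people : Int) (groups : Int), Dom_countOptions people groups → Pre_countOptions people groups → Spec_countOptions people groups (countOptions people groups)

-- ===== LEMMAS AND PROOFS =====

-- closed form of one finished DP cell (rows 1 ≤ i, columns 1 ≤ j)
def pvCf (i j : Int) : Int :=
  if j ≤ i then 2 ^ (j - 1).toNat else if j = i + 1 then 1 else 0

-- table state after rows 1..m have been processed (g = groups)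
def pvTab (people g m : Int) (a b : Int) : Int :=
  if 1 ≤ a ∧ a ≤ m ∧ 2 ≤ b ∧ b ≤ g then pvCf a b
  else if b = 1 ∧ 0 ≤ a ∧ a ≤ people then 1
  else if a = 0 ∧ b = 0 then 1
  else 0

-- row-i state while the inner loop has filled columns 2 .. c-1
def pvRowState (people g i c : Int) : Int → Int → Int :=
  fun a b => if a = i ∧ 2 ≤ b ∧ b < c then pvCf i b else pvTab people g (i-1) a b

-- well-formed table: (people+1) rows of (g+1) cells
def pvWf (people g : Int) (v : List (List Int)) : Prop :=
  v.length = (people + 1).toNat ∧ ∀ k, (h : k < v.length) → v[k].length = (g + 1).toNat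

-- the table realises the abstract state f at every nonnegative index pair
def pvLike (f : Int → Int → Int) (v : List (List Int)) : Prop :=
  ∀ a b : Int, 0 ≤ a → 0 ≤ b → pvGet2 v a b = f a b

theorem pvGetD_nn {α : Type} (xs : List α) (d : α) (a : Int) (ha : 0 ≤ a) :
    PySem.List.pyGetD xs a d = (xs[a.toNat]?).getD d := by
  have h : PySem.List.pyGetD xs ((a.toNat : Nat) : Int) d = xs.getD a.toNat d :=
    PySem.List.pyGetD_natCast xs a.toNat d
  rw [show ((a.toNat : Nat) : Int) = a from by omega] at h
  rw [h, List.getD_eq_getElem?_getD]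

theorem pvGet2_nn (v : List (List Int)) (a b : Int) (ha : 0 ≤ a) (hb : 0 ≤ b) :
    pvGet2 v a b = (((v[a.toNat]?).getD [])[b.toNat]?).getD 0 := by
  unfold pvGet2
  rw [pvGetD_nn v [] a ha, pvGetD_nn _ 0 b hb]

theorem pvWf_set2 (people g : Int) (v : List (List Int)) (i j x : Int)
    (hwf : pvWf people g v) : pvWf people g (pvSet2 v i j x) := by
  obtain ⟨hlen, hrows⟩ := hwf
  refine ⟨by simpa [pvSet2] using hlen, ?_⟩
  intro k hk
  simp only [pvSet2, List.length_set] at hk ⊢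
  rw [List.getElem_set]
  split_ifs with hk1
  · rw [List.length_set]
    subst hk1
    rw [List.getD_eq_getElem?_getD, List.getElem?_eq_getElem hk, Option.getD_some]
    exact hrows _ hk
  · exact hrows _ _

theorem pvGet2_set2 (people g : Int) (v : List (List Int)) (i j x a b : Int)
    (hwf : pvWf people g v) (hi : 0 ≤ i) (hip : i ≤ people) (hj : 0 ≤ j) (hjg : j ≤ g)
    (ha : 0 ≤ a) (hb : 0 ≤ b) :
    pvGet2 (pvSet2 v i j x) a b = if a = i ∧ b = j then x else pvGet2 v a b := by
  obtain ⟨hlen, hrows⟩ := hwf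
  have hiL : i.toNat < v.length := by omega
  have hrowlen : v[i.toNat].length = (g + 1).toNat := hrows _ hiL
  rw [pvGet2_nn _ _ _ ha hb, pvGet2_nn v a b ha hb]
  by_cases hai : a = i
  · subst hai
    have h1 : (pvSet2 v a j x)[a.toNat]? = some ((v[a.toNat]).set j.toNat x) := by
      simp [pvSet2, hiL]
    rw [h1, Option.getD_some, List.getElem?_eq_getElem hiL, Option.getD_some]
    by_cases hbj : b = j
    · rw [if_pos ⟨rfl, hbj⟩, show b.toNat = j.toNat from by omega]
      have hjL : j.toNat < v[a.toNat].length := by omega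
      simp [hjL]
    · rw [if_neg (by tauto)]
      simp [show j.toNat ≠ b.toNat from by omega]
  · have h1 : (pvSet2 v i j x)[a.toNat]? = v[a.toNat]? := by
      simp [pvSet2, show i.toNat ≠ a.toNat from by omega]
    rw [h1, if_neg (by tauto)]

theorem pv_v0 (people g : Int) :
    pvWf people g ((PySem.List.pyRange 0 (people+1) 1).map
        (fun _ => (PySem.List.pyRange 0 (g+1) 1).map (fun _ => (0:Int))))
      ∧ pvLike (fun _ _ => 0) ((PySem.List.pyRange 0 (people+1) 1).map
        (fun _ => (PySem.List.pyRange 0 (g+1) 1).map (fun _ => (0:Int)))) := by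
  constructor
  · constructor
    · simp [PySem.List.length_pyRange_one]
    · intro k hk
      simp [PySem.List.length_pyRange_one]
  · intro a b ha hb
    rw [pvGet2_nn _ _ _ ha hb]
    rw [List.getElem?_map]
    cases h : (PySem.List.pyRange 0 (people+1) 1)[a.toNat]? with
    | none => simp
    | some y =>
        simp only [Option.map_some, Option.getD_some, List.getElem?_map]
        cases h2 : (PySem.List.pyRange 0 (g+1) 1)[b.toNat]? with
        | none => simp
        | some z => simp

theorem pv_v1 (people g s : Int) (n : Nat) (v : List (List Int)) (f : Int → Int → Int)
    (hg : 1 ≤ g) (hs : 0 ≤ s) (hn : s + n ≤ people + 1)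
    (hwf : pvWf people g v) (hlike : pvLike f v) :
    pvWf people g ((PySem.List.pyRange s (s + n) 1).foldl (fun v i => pvSet2 v i 1 1) v)
      ∧ pvLike (fun a b => if b = 1 ∧ s ≤ a ∧ a < s + n then 1 else f a b)
        ((PySem.List.pyRange s (s + n) 1).foldl (fun v i => pvSet2 v i 1 1) v) := by
  induction n generalizing v f with
  | zero =>
      rw [PySem.List.pyRange_one_eq_nil (by omega)]
      refine ⟨hwf, ?_⟩
      intro a b ha hb
      simp only [List.foldl_nil]
      rw [if_neg (by omega)]
      exact hlike a b ha hb
  | succ n ih =>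
      rw [show (s + (n + 1 : Nat) : Int) = (s + n) + 1 from by push_cast; ring,
        PySem.List.pyRange_one_succ_right (a := s) (b := s + n) (by omega),
        List.foldl_append]
      obtain ⟨hwf', hlike'⟩ := ih v f (by push_cast at hn ⊢; omega) hwf hlike
      simp only [List.foldl_cons, List.foldl_nil]
      refine ⟨pvWf_set2 people g _ _ _ _ hwf', ?_⟩
      intro a b ha hb
      rw [pvGet2_set2 people g _ _ _ _ a b hwf' (by omega) (by push_cast at hn; omega)
        (by omega) (by omega) ha hb]
      rw [hlike' a b ha hb]
      simp only []
      split_ifs <;> first | rfl | omega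

theorem pv_init (people g : Int) (hp : 0 ≤ people) (hg : 1 ≤ g) :
    pvWf people g (pvSet2 ((PySem.List.pyRange 0 (people + 1) 1).foldl
        (fun v i => pvSet2 v i 1 1)
        ((PySem.List.pyRange 0 (people+1) 1).map
          (fun _ => (PySem.List.pyRange 0 (g+1) 1).map (fun _ => (0:Int))))) 0 0 1)
      ∧ pvLike (pvTab people g 0) (pvSet2 ((PySem.List.pyRange 0 (people + 1) 1).foldl
        (fun v i => pvSet2 v i 1 1)
        ((PySem.List.pyRange 0 (people+1) 1).map
          (fun _ => (PySem.List.pyRange 0 (g+1) 1).map (fun _ => (0:Int))))) 0 0 1) := by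
  obtain ⟨hwf0, hlike0⟩ := pv_v0 people g
  have h : (people + 1) = ((0:Int) + ((people.toNat + 1 : Nat) : Int)) := by omega
  obtain ⟨hwf1, hlike1⟩ := pv_v1 people g 0 (people.toNat + 1) _ _ hg le_rfl
    (by omega) hwf0 hlike0
  rw [← h] at hwf1 hlike1
  refine ⟨pvWf_set2 people g _ _ _ _ hwf1, ?_⟩
  intro a b ha hb
  rw [pvGet2_set2 people g _ _ _ _ a b hwf1 le_rfl hp le_rfl (by omega) ha hb]
  rw [hlike1 a b ha hb]
  simp only []
  unfold pvTab
  split_ifs <;> first | rfl | omega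

theorem pv_cf_one (a : Int) (h : 0 ≤ a) : pvCf a 1 = 1 := by
  unfold pvCf
  split_ifs with h1 h2
  · norm_num
  · rfl
  · omega

-- the value A writes into cell (i, j) equals the closed form there
theorem pv_cf_step (i j : Int) (_hi : 1 ≤ i) (hj : 2 ≤ j) :
    (if i ≥ j then pvCf (i-1) (j-1) + pvCf i (j-1) else pvCf (i-1) (j-1)) = pvCf i j := by
  unfold pvCf
  have h2 : (j - 1).toNat = (j - 1 - 1).toNat + 1 := by omega
  split_ifs <;> first | rfl | omega | (rw [h2]; ring)

-- what A's inner body reads from row i-1 (not yet rewritten) and column 1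
theorem pv_read_prev (people g i j : Int) (hi : 1 ≤ i) (hip : i ≤ people)
    (hj : 2 ≤ j) (hjg : j ≤ g) :
    pvTab people g (i-1) (i-1) (j-1) = pvCf (i-1) (j-1) := by
  unfold pvTab pvCf
  split_ifs <;>
    first
      | rfl
      | omega
      | (have h0 : (j - 1 - 1).toNat = 0 := (by omega); simp [h0])

theorem pv_read_col1 (people g i : Int) (hi : 1 ≤ i) (hip : i ≤ people) :
    pvTab people g (i-1) i 1 = pvCf i 1 := by
  rw [pv_cf_one i (by omega)]
  unfold pvTab
  split_ifs <;> first | rfl | omega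

-- the two reads of A's inner-loop body, on the partial row state
theorem pv_reads (people g i j : Int) (hi : 1 ≤ i) (hip : i ≤ people)
    (hj2 : 2 ≤ j) (hjg : j ≤ g) :
    pvRowState people g i j (i-1) (j-1) = pvCf (i-1) (j-1)
      ∧ pvRowState people g i j i (j-1) = pvCf i (j-1) := by
  constructor
  · unfold pvRowState
    rw [if_neg (by omega)]
    exact pv_read_prev people g i j hi hip hj2 hjg
  · unfold pvRowState
    by_cases h1 : 2 ≤ j - 1
    · rw [if_pos (by omega)]
    · rw [if_neg (by omega)]
      have hj1 : j - 1 = 1 := by omega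
      rw [hj1]
      exact pv_read_col1 people g i hi hip

-- after writing pvCf i j into cell (i, j), the row state advances one column
theorem pv_rowstate_next (people g i j a b : Int) (hj2 : 2 ≤ j) :
    (if a = i ∧ b = j then pvCf i j else pvRowState people g i j a b)
      = pvRowState people g i (j + 1) a b := by
  simp only [pvRowState]
  split_ifs <;> first | rfl | omega | simp_all

-- inner loop, first n columns (columns 2 .. 1+n) of row i
theorem pv_inner (people g i : Int) (hi : 1 ≤ i) (hip : i ≤ people) (n : Nat)
    (hn : (1 + n : Int) ≤ g) (v : List (List Int))
    (hwf : pvWf people g v) (hlike : pvLike (pvTab people g (i-1)) v) :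
    pvWf people g ((PySem.List.pyRange 2 (2 + n) 1).foldl (fun v j =>
        if i ≥ j then pvSet2 v i j (pvGet2 v (i-1) (j-1) + pvGet2 v i (j-1))
        else pvSet2 v i j (pvGet2 v (i-1) (j-1))) v)
      ∧ pvLike (pvRowState people g i (2 + n))
        ((PySem.List.pyRange 2 (2 + n) 1).foldl (fun v j =>
          if i ≥ j then pvSet2 v i j (pvGet2 v (i-1) (j-1) + pvGet2 v i (j-1))
          else pvSet2 v i j (pvGet2 v (i-1) (j-1))) v) := by
  induction n with
  | zero =>
      rw [PySem.List.pyRange_one_eq_nil (by omega)]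
      refine ⟨hwf, ?_⟩
      intro a b ha hb
      simp only [List.foldl_nil, pvRowState]
      rw [if_neg (by omega)]
      exact hlike a b ha hb
  | succ n ih =>
      rw [show ((2 : Int) + (n + 1 : Nat)) = (2 + n) + 1 from by push_cast; ring,
        PySem.List.pyRange_one_succ_right (a := 2) (b := 2 + n) (by omega),
        List.foldl_append]
      obtain ⟨hwf', hlike'⟩ := ih (by push_cast at hn ⊢; omega)
      simp only [List.foldl_cons, List.foldl_nil]
      set j : Int := 2 + (n : Int) with hjdef
      have hj2 : 2 ≤ j := by omega
      have hjg : j ≤ g := by push_cast at hn; omega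
      obtain ⟨hx, hy⟩ := pv_reads people g i j hi hip hj2 hjg
      have hrx : pvGet2 ((PySem.List.pyRange 2 j 1).foldl (fun v j =>
          if i ≥ j then pvSet2 v i j (pvGet2 v (i-1) (j-1) + pvGet2 v i (j-1))
          else pvSet2 v i j (pvGet2 v (i-1) (j-1))) v) (i-1) (j-1)
          = pvCf (i-1) (j-1) := by
        rw [hlike' (i-1) (j-1) (by omega) (by omega)]; exact hx
      have hry : pvGet2 ((PySem.List.pyRange 2 j 1).foldl (fun v j =>
          if i ≥ j then pvSet2 v i j (pvGet2 v (i-1) (j-1) + pvGet2 v i (j-1))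
          else pvSet2 v i j (pvGet2 v (i-1) (j-1))) v) i (j-1)
          = pvCf i (j-1) := by
        rw [hlike' i (j-1) (by omega) (by omega)]; exact hy
      have hw := pv_cf_step i j hi hj2
      by_cases hij : i ≥ j
      · rw [if_pos hij] at hw ⊢
        refine ⟨pvWf_set2 people g _ _ _ _ hwf', ?_⟩
        intro a b ha hb
        rw [pvGet2_set2 people g _ _ _ _ a b hwf' (by omega) hip (by omega) hjg ha hb,
          hrx, hry, hw, hlike' a b ha hb]
        exact pv_rowstate_next people g i j a b hj2
      · rw [if_neg hij] at hw ⊢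
        refine ⟨pvWf_set2 people g _ _ _ _ hwf', ?_⟩
        intro a b ha hb
        rw [pvGet2_set2 people g _ _ _ _ a b hwf' (by omega) hip (by omega) hjg ha hb,
          hrx, hw, hlike' a b ha hb]
        exact pv_rowstate_next people g i j a b hj2

-- whole inner loop: row i transforms pvTab (i-1) into pvTab i
theorem pv_row (people g i : Int) (hg : 1 ≤ g) (hi : 1 ≤ i) (hip : i ≤ people)
    (v : List (List Int))
    (hwf : pvWf people g v) (hlike : pvLike (pvTab people g (i-1)) v) :
    pvWf people g ((PySem.List.pyRange 2 (g + 1) 1).foldl (fun v j =>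
        if i ≥ j then pvSet2 v i j (pvGet2 v (i-1) (j-1) + pvGet2 v i (j-1))
        else pvSet2 v i j (pvGet2 v (i-1) (j-1))) v)
      ∧ pvLike (pvTab people g i)
        ((PySem.List.pyRange 2 (g + 1) 1).foldl (fun v j =>
          if i ≥ j then pvSet2 v i j (pvGet2 v (i-1) (j-1) + pvGet2 v i (j-1))
          else pvSet2 v i j (pvGet2 v (i-1) (j-1))) v) := by
  have hg1 : g + 1 = 2 + (((g - 1).toNat : Nat) : Int) := by omega
  rw [hg1]
  obtain ⟨hwf', hlike'⟩ := pv_inner people g i hi hip (g-1).toNat (by omega) v hwf hlike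
  refine ⟨hwf', ?_⟩
  intro a b ha hb
  rw [hlike' a b ha hb]
  simp only [pvRowState]
  unfold pvTab
  split_ifs <;> first | rfl | omega | simp_all

theorem pv_outer (people g : Int) (hg : 1 ≤ g) (n : Nat) (hn : (n : Int) ≤ people)
    (v : List (List Int))
    (hwf : pvWf people g v) (hlike : pvLike (pvTab people g 0) v) :
    pvWf people g ((PySem.List.pyRange 1 (1 + n) 1).foldl (fun v i =>
      (PySem.List.pyRange 2 (g + 1) 1).foldl (fun v j =>
        if i ≥ j then pvSet2 v i j (pvGet2 v (i-1) (j-1) + pvGet2 v i (j-1))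
        else pvSet2 v i j (pvGet2 v (i-1) (j-1))) v) v)
      ∧ pvLike (pvTab people g n)
        ((PySem.List.pyRange 1 (1 + n) 1).foldl (fun v i =>
          (PySem.List.pyRange 2 (g + 1) 1).foldl (fun v j =>
            if i ≥ j then pvSet2 v i j (pvGet2 v (i-1) (j-1) + pvGet2 v i (j-1))
            else pvSet2 v i j (pvGet2 v (i-1) (j-1))) v) v) := by
  induction n with
  | zero =>
      rw [PySem.List.pyRange_one_eq_nil (a := 1) (b := 1 + ((0:Nat):Int)) (by omega)]
      exact ⟨hwf, by simpa using hlike⟩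
  | succ n ih =>
      rw [show ((1 : Int) + (n + 1 : Nat)) = (1 + n) + 1 from by push_cast; ring,
        PySem.List.pyRange_one_succ_right (a := 1) (b := 1 + n) (by omega),
        List.foldl_append]
      obtain ⟨hwf', hlike'⟩ := ih (by push_cast at hn ⊢; omega)
      simp only [List.foldl_cons, List.foldl_nil]
      have hrow := pv_row people g (1 + n) hg (by omega) (by push_cast at hn ⊢; omega)
        _ hwf' (by rw [show (1 + (n : Int)) - 1 = (n : Int) from by ring]; exact hlike')
      obtain ⟨hwf2, hlike2⟩ := hrow
      refine ⟨hwf2, ?_⟩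
      intro a b ha hb
      rw [hlike2 a b ha hb]
      congr 1
      push_cast; ring

theorem pv_outer_final (people g : Int) (hg : 1 ≤ g) (hp : 0 ≤ people)
    (v : List (List Int))
    (hwf : pvWf people g v) (hlike : pvLike (pvTab people g 0) v) :
    pvLike (pvTab people g people)
      ((PySem.List.pyRange 1 (people + 1) 1).foldl (fun v i =>
        (PySem.List.pyRange 2 (g + 1) 1).foldl (fun v j =>
          if i ≥ j then pvSet2 v i j (pvGet2 v (i-1) (j-1) + pvGet2 v i (j-1))
          else pvSet2 v i j (pvGet2 v (i-1) (j-1))) v) v) := by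
  rw [show people + 1 = 1 + ((people.toNat : Nat) : Int) from by omega]
  obtain ⟨-, hlike2⟩ := pv_outer people g hg people.toNat (by omega) v hwf hlike
  intro a b ha hb
  rw [hlike2 a b ha hb, show (((people.toNat : Nat)) : Int) = people from by omega]

-- ===== VERDICT (by name: the statement is the Claim_ definition above) =====
theorem countOptions_spec : Claim_equal_countOptions := by
  intro people groups _ hpre
  obtain ⟨hp, hg⟩ := hpre
  show countOptions people groups = countOptions_alt people groups
  unfold countOptions
  simp only []
  obtain ⟨hwf1, hlike1⟩ := pv_init people groups hp hg
  have hlike2 := pv_outer_final people groups hg hp _ hwf1 hlike1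
  rw [hlike2 people groups hp (by omega)]
  unfold pvTab pvCf countOptions_alt
  split_ifs <;>
    first
      | rfl
      | omega
      | (have h0 : (groups - 1).toNat = 0 := (by omega); simp [h0])
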